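-- pv_equiv track=rewrite | github.com/Danwerk/Python-course | EXAM/exam4/exam.py | pairwise_max_letter
-- ===== SOURCE A (Python) =====
-- def pairwise_max_letter(s: str) -> str:
--     """
--     Take higher letter from each pair of letters.
--
--     The length of the input string is an even number.
--     Take each pair and take only the higher of those two elements.
--     "ab" => "b"
--     "aa" => "a"
--     "ax" => "x"
--     There are only lower case latin letters (a-z) in input.
--
--     Hint: you can compare elements: "z" > "a" (True), "a" > "b" (False)
--
--     pairwise_max_letter("") => ""
--     pairwise_max_letter("ab") => "b"
--     pairwise_max_letter("abaa") => "ba"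
--     pairwise_max_letter("xaxy") => "xy"
--     """
--     ret = ''
--     if s == '':
--         return ''
--     pairs = []
--     pairs_amnt = int(len(s) / 2)
--     for i in range(pairs_amnt):
--         pair = s[0:2]
--         pairs.append(pair)
--         s = s.replace(pair, '', 1)
--
--     for j in pairs:
--         if j[0] > j[1]:
--             ret += j[0]
--         elif j[0] < j[1]:
--             ret += j[1]
--         elif j[0] == j[1]:
--             ret += j[0]
--     return ret
-- ===== SOURCE B (Python) =====
-- def pairwise_max_letter(s: str) -> str:
--     evens = s[0::2]
--     odds = s[1::2]
--     return ''.join(max(a, b) for a, b in zip(evens, odds))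
-- ===== Notes on version B (the rewrite author's own statement) =====
-- stated objective: faster
-- what changed: A builds a list of consecutive pairs by repeatedly slicing off and replace-deleting the two-char prefix (each replace rescans the remaining string), then loops over the pairs with a three-branch comparison; B takes the two strided slices s[0::2] and s[1::2], zips them and joins the max of each pair in one pass.
import Mathlib
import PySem

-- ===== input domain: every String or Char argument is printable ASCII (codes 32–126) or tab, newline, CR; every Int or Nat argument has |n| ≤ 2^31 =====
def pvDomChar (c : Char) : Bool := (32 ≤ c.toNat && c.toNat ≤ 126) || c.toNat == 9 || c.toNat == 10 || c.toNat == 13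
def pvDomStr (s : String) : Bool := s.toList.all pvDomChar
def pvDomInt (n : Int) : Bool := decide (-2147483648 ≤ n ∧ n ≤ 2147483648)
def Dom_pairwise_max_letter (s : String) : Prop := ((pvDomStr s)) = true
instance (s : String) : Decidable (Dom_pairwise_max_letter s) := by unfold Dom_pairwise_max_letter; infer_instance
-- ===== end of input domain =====

-- B replaces A's build-pairs-by-repeated-replace loop (quadratic: each replace rescans) with two strided slices zipped and maxed, one linear pass.

-- ===== PORT A =====
-- hand port of Python's s.replace(old, '', 1): remove the FIRST occurrence of old, exact for any old
def pvReplaceFirst (s old : List Char) : List Char :=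
  if old.isPrefixOf s then s.drop old.length
  else
    match s with
    | [] => []
    | c :: t => c :: pvReplaceFirst t old

def pairwise_max_letter (s : String) : String :=
  let cs := s.toList
  if cs = [] then "" else
  let pairs_amnt := cs.length / 2   -- int(len(s)/2): exact, float halving of a length is exact
  let st := (PySem.List.pyRange 0 (pairs_amnt : Int) 1).foldl
      (fun (st : List (List Char) × List Char) _ =>
        let pair := PySem.List.slice st.2 (some 0) (some 2)
        (st.1 ++ [pair], pvReplaceFirst st.2 pair)) ([], cs)
  let ret := st.1.foldl
      (fun ret j =>
        match PySem.List.pyGet? j 0, PySem.List.pyGet? j 1 with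
        | some a, some b =>
          if a > b then ret ++ [a] else if a < b then ret ++ [b] else ret ++ [a]
        | _, _ => ret)   -- unreachable: every pair built by the first loop has length 2
      ([] : List Char)
  String.ofList ret

-- ===== PORT B =====
def pairwise_max_letter_alt (s : String) : String :=
  let cs := s.toList
  let evens := (PySem.List.slice? cs (some 0) none 2).getD []  -- s[0::2]; step 2 ≠ 0, never none
  let odds  := (PySem.List.slice? cs (some 1) none 2).getD []  -- s[1::2]
  -- ''.join(max(a, b) for a, b in zip(evens, odds)): join of single-char strings = the list of maxima
  String.ofList ((evens.zip odds).map (fun p => max p.1 p.2))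

-- ===== PRECONDITION & SPEC =====
def Spec_pairwise_max_letter (s : String) (out : String) : Prop := out = pairwise_max_letter_alt s
instance (s : String) (out : String) : Decidable (Spec_pairwise_max_letter s out) := by unfold Spec_pairwise_max_letter; infer_instance

-- ===== CLAIM (what is proved, stated in full; the proofs are below) =====
def Claim_equal_pairwise_max_letter : Prop := ∀ (s : String), Dom_pairwise_max_letter s → Spec_pairwise_max_letter s (pairwise_max_letter s)

-- ===== LEMMAS AND PROOFS =====

-- every-other element (the canonical value of a [i::2] slice)
def pvEo : List Char → List Char
  | [] => []
  | [a] => [a]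
  | a :: _ :: t => a :: pvEo t

-- pair-chunks of the first n pairs
def pvChunk : Nat → List Char → List (List Char)
  | 0, _ => []
  | n + 1, cs => cs.take 2 :: pvChunk n (cs.drop 2)

-- canonical result: max of each consecutive pair
def pvPm : List Char → List Char
  | a :: b :: t => max a b :: pvPm t
  | _ => []

theorem pvEo_cons (b : Char) (t : List Char) : pvEo (b :: t) = b :: pvEo t.tail := by
  cases t <;> simp [pvEo]

theorem fm_even (cs : List Char) :
    List.filterMap (fun k => cs[2 * k]?) (List.range ((cs.length + 1) / 2)) = pvEo cs := by
  induction cs using pvEo.induct with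
  | case1 => simp [pvEo]
  | case2 a => simp [pvEo]
  | case3 a b t ih =>
    have h2 : ((a :: b :: t).length + 1) / 2 = (t.length + 1) / 2 + 1 := by simp; omega
    rw [h2, List.range_succ_eq_map]
    simp only [List.filterMap_cons, List.filterMap_map]
    simp only [Function.comp_def, Nat.mul_succ]
    have h3 : ∀ k : Nat, (a :: b :: t)[2 * k + 2]? = t[2 * k]? := by
      intro k; simp
    simp only [h3]
    simp [pvEo, ih]

theorem fm_odd (cs : List Char) :
    List.filterMap (fun k => cs[2 * k + 1]?) (List.range (cs.length / 2)) = pvEo cs.tail := by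
  induction cs using pvEo.induct with
  | case1 => simp [pvEo]
  | case2 a => simp [pvEo]
  | case3 a b t ih =>
    have h2 : (a :: b :: t).length / 2 = t.length / 2 + 1 := by simp; omega
    rw [h2, List.range_succ_eq_map]
    simp only [List.filterMap_cons, List.filterMap_map]
    simp only [Function.comp_def, Nat.mul_succ]
    have h3 : ∀ k : Nat, (a :: b :: t)[2 * k + 2 + 1]? = t[2 * k + 1]? := by
      intro k; simp
    simp only [h3]
    simp [pvEo_cons, ih]

theorem slice_even (cs : List Char) :
    PySem.List.slice? cs (some 0) none 2 = some (pvEo cs) := by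
  simp only [PySem.List.slice?, PySem.List.sliceIndices]
  norm_num
  have h1 : (fun x : Nat => cs[(2 * (x:Int)).toNat]?) = (fun x : Nat => cs[2 * x]?) := by
    funext x
    congr 1
  have h2 : (if 0 < cs.length then (((cs.length : Int) + 2 - 1) / 2).toNat else 0)
      = (cs.length + 1) / 2 := by
    split <;> omega
  rw [h1, h2, fm_even]

theorem slice_odd (cs : List Char) :
    PySem.List.slice? cs (some 1) none 2 = some (pvEo cs.tail) := by
  cases cs with
  | nil => rfl
  | cons a t =>
    simp only [PySem.List.slice?, PySem.List.sliceIndices]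
    norm_num
    have h1 : (fun x : Nat => (a :: t)[((1:Int) + 2 * (x:Int)).toNat]?)
        = (fun x : Nat => (a :: t)[2 * x + 1]?) := by
      funext x
      congr 1
      omega
    have h2 : (if 0 < t.length then (((t.length : Int) + 2 - 1) / 2).toNat else 0)
        = (a :: t).length / 2 := by
      split <;> simp <;> omega
    rw [h1, h2]
    simpa using fm_odd (a :: t)

theorem replaceFirst_prefix (cs : List Char) :
    pvReplaceFirst cs (cs.take 2) = cs.drop 2 := by
  have hp : (cs.take 2).isPrefixOf cs = true := by
    simpa [List.isPrefixOf_iff_prefix] using List.take_prefix 2 cs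
  rw [pvReplaceFirst.eq_def]
  simp only [hp, if_true, List.length_take]
  by_cases h : 2 ≤ cs.length
  · simp [Nat.min_eq_left h]
  · have h0 : min 2 cs.length = cs.length := by omega
    rw [h0]
    rw [List.drop_length, List.drop_eq_nil_of_le (by omega)]

theorem loopA (l : List Int) (ps : List (List Char)) (cs : List Char)
    (h : 2 * l.length ≤ cs.length) :
    l.foldl (fun (st : List (List Char) × List Char) _ =>
        let pair := PySem.List.slice st.2 (some 0) (some 2)
        (st.1 ++ [pair], pvReplaceFirst st.2 pair)) (ps, cs)
      = (ps ++ pvChunk l.length cs, cs.drop (2 * l.length)) := by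
  induction l generalizing ps cs with
  | nil => simp [pvChunk]
  | cons hd tl ih =>
    have hsl : PySem.List.slice cs (some 0) (some 2) = cs.take 2 := by
      simp [PySem.List.slice_to]
    simp only [List.foldl_cons, hsl, replaceFirst_prefix]
    rw [ih _ _ (by simp at h ⊢; omega)]
    simp only [pvChunk, List.length_cons, List.drop_drop]
    rw [Prod.mk.injEq]
    refine ⟨by simp, by congr 1; omega⟩

theorem fold_chunk (n : Nat) (cs : List Char) (acc : List Char) (h : 2 * n ≤ cs.length) :
    (pvChunk n cs).foldl
      (fun ret j =>
        match PySem.List.pyGet? j 0, PySem.List.pyGet? j 1 with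
        | some a, some b =>
          if a > b then ret ++ [a] else if a < b then ret ++ [b] else ret ++ [a]
        | _, _ => ret) acc
      = acc ++ pvPm (cs.take (2 * n)) := by
  induction n generalizing cs acc with
  | zero => simp [pvChunk, pvPm]
  | succ n ih =>
    match cs, h with
    | a :: b :: t, h =>
      have hg0 : PySem.List.pyGet? ([a, b] : List Char) 0 = some a := by
        simp [PySem.List.pyGet?, PySem.List.pyIdx?]
      have hg1 : PySem.List.pyGet? ([a, b] : List Char) 1 = some b := by
        simp [PySem.List.pyGet?, PySem.List.pyIdx?]
      have hstep : (if a > b then acc ++ [a] else if a < b then acc ++ [b] else acc ++ [a])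
          = acc ++ [max a b] := by
        rcases lt_trichotomy a b with hlt | heq | hgt
        · simp [hlt, not_lt_of_gt hlt, max_eq_right (le_of_lt hlt)]
        · simp [heq]
        · simp [hgt, max_eq_left (le_of_lt hgt)]
      simp only [pvChunk, List.take_succ_cons, List.take_zero, List.drop_succ_cons,
        List.drop_zero, List.foldl_cons]
      show List.foldl _ (if a > b then acc ++ [a] else if a < b then acc ++ [b] else acc ++ [a]) _ = _
      rw [hstep]
      rw [ih t _ (by simp at h ⊢; omega)]
      have htake : List.take (2 * (n + 1)) (a :: b :: t) = a :: b :: List.take (2 * n) t := by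
        have : 2 * (n + 1) = (2 * n + 1) + 1 := by omega
        rw [this]
        simp [List.take_succ_cons]
      rw [htake]
      simp [pvPm]

theorem key (cs : List Char) :
    ((pvEo cs).zip (pvEo cs.tail)).map (fun p => max p.1 p.2)
      = pvPm (cs.take (2 * (cs.length / 2))) := by
  induction cs using pvEo.induct with
  | case1 => simp [pvEo, pvPm]
  | case2 a => simp [pvEo, pvPm]
  | case3 a b t ih =>
    have h2 : (a :: b :: t).length / 2 = t.length / 2 + 1 := by simp; omega
    rw [h2]
    have htake : List.take (2 * (t.length / 2 + 1)) (a :: b :: t)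
        = a :: b :: List.take (2 * (t.length / 2)) t := by
      have : 2 * (t.length / 2 + 1) = (2 * (t.length / 2) + 1) + 1 := by omega
      rw [this]
      simp [List.take_succ_cons]
    rw [htake]
    simp only [pvEo, List.tail_cons, pvEo_cons, List.zip_cons_cons, List.map_cons]
    rw [ih]
    simp [pvPm]

-- ===== VERDICT (by name: the statement is the Claim_ definition above) =====
theorem pairwise_max_letter_spec : Claim_equal_pairwise_max_letter := by
  intro s _
  unfold Spec_pairwise_max_letter pairwise_max_letter pairwise_max_letter_alt
  simp only [slice_even, slice_odd, Option.getD_some, key]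
  by_cases hcs : s.toList = []
  · simp [hcs, pvPm]
  · rw [if_neg hcs]
    have hlen : (PySem.List.pyRange 0 ((s.toList.length / 2 : Nat) : Int) 1).length
        = s.toList.length / 2 := by
      rw [PySem.List.length_pyRange_one]
      omega
    rw [loopA _ [] _ (by rw [hlen]; omega)]
    rw [hlen]
    simp only [List.nil_append]
    rw [fold_chunk _ _ _ (by omega)]
    simp
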